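-- pv_equiv track=rewrite | github.com/dakshjain-1616/sql-trust-lens | sql_trust_lens/eval_engine.py | _split_select_columns
-- ===== SOURCE A (Python) =====
-- from typing import Dict, List, Optional, Set, Tuple
--
-- def _split_select_columns(clause: str) -> List[str]:
--     """Split a SELECT column list respecting nested parentheses."""
--     parts: List[str] = []
--     depth = 0
--     buf: List[str] = []
--     for ch in clause:
--         if ch == "(":
--             depth += 1
--             buf.append(ch)
--         elif ch == ")":
--             depth -= 1
--             buf.append(ch)
--         elif ch == "," and depth == 0:
--             parts.append("".join(buf).strip())
--             buf = []
--         else: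
--             buf.append(ch)
--     if buf:
--         parts.append("".join(buf).strip())
--     return parts
-- ===== SOURCE B (Python) =====
-- from typing import List
--
-- def _split_select_columns(clause: str) -> List[str]:
--     """Split a SELECT column list respecting nested parentheses.
--
--     One scan tracking depth and the index of the last top-level comma;
--     parts are produced by slicing the original string (no character buffer).
--     """
--     parts: List[str] = []
--     start = 0
--     depth = 0
--     for i, ch in enumerate(clause):
--         if ch == "(":
--             depth += 1
--         elif ch == ")":
--             depth -= 1
--         elif ch == "," and depth == 0:
--             parts.append(clause[start:i].strip())
--             start = i + 1
--     if start < len(clause):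
--         parts.append(clause[start:].strip())
--     return parts
-- ===== Notes on version B (the rewrite author's own statement) =====
-- stated objective: alternative
-- what changed: B drops A's character buffer: it tracks the index after the last top-level comma and emits each part by slicing the original string, with the trailing part guarded by start < len instead of a non-empty buffer.
import Mathlib
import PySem

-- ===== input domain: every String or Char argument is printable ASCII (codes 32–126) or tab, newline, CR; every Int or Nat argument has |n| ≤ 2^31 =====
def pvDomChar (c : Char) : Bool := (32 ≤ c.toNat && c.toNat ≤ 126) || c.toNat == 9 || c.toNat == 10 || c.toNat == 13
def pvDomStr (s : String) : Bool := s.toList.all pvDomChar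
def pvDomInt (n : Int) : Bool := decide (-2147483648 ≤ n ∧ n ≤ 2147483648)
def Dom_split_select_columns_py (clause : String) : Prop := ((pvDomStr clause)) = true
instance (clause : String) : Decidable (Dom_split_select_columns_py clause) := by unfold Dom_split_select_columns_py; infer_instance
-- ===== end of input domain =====

-- B replaces A's character buffer by a last-cut index and produces each part by slicing
-- the original string (objective: alternative decomposition, same O(n) cost).

-- ===== PORT A =====
-- A's loop: state (parts, depth, buf); buf is the list of characters since the last
-- top-level comma ("".join(buf) is exactly String.ofList buf since buf holds single chars).
def splitLoopA (suf : List Char) (parts : List String) (depth : Int) (buf : List Char) :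
    List String :=
  match suf with
  | [] => if buf ≠ [] then parts ++ [String.ofList (PySem.Chars.strip buf)] else parts
  | ch :: rest =>
    if ch = '(' then splitLoopA rest parts (depth + 1) (buf ++ [ch])
    else if ch = ')' then splitLoopA rest parts (depth - 1) (buf ++ [ch])
    else if ch = ',' ∧ depth = 0 then
      splitLoopA rest (parts ++ [String.ofList (PySem.Chars.strip buf)]) depth []
    else splitLoopA rest parts depth (buf ++ [ch])

def split_select_columns_py (clause : String) : List String :=
  splitLoopA clause.toList [] 0 []

-- ===== PORT B =====
-- B's loop over enumerate(clause): state (parts, start, depth); clause[start:i] and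
-- clause[start:] are PySem.List.slice on the character list.
def splitLoopB (suf : List (Int × Char)) (cs : List Char) (parts : List String)
    (start : Int) (depth : Int) : List String :=
  match suf with
  | [] =>
      if start < (cs.length : Int) then
        parts ++ [String.ofList (PySem.Chars.strip (PySem.List.slice cs (some start) none))]
      else parts
  | (i, ch) :: rest =>
    if ch = '(' then splitLoopB rest cs parts start (depth + 1)
    else if ch = ')' then splitLoopB rest cs parts start (depth - 1)
    else if ch = ',' ∧ depth = 0 then
      splitLoopB rest cs
        (parts ++ [String.ofList (PySem.Chars.strip (PySem.List.slice cs (some start) (some i)))])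
        (i + 1) depth
    else splitLoopB rest cs parts start depth

def split_select_columns_py_alt (clause : String) : List String :=
  splitLoopB (PySem.List.enumerate clause.toList 0) clause.toList [] 0 0

-- ===== PRECONDITION & SPEC =====
def Spec_split_select_columns_py (clause : String) (out : List String) : Prop := out = split_select_columns_py_alt clause
instance (clause : String) (out : List String) : Decidable (Spec_split_select_columns_py clause out) := by unfold Spec_split_select_columns_py; infer_instance

-- ===== CLAIM (what is proved, stated in full; the proofs are below) =====
def Claim_equal_split_select_columns_py : Prop := ∀ (clause : String), Dom_split_select_columns_py clause → Spec_split_select_columns_py clause (split_select_columns_py clause)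

-- ===== LEMMAS AND PROOFS =====

-- Invariant: at position k (suffix suf = cs.drop k), A's buffer is exactly the slice of cs
-- from the last cut `start` up to k; then the two loops produce the same parts.
theorem splitLoop_agree (cs : List Char) :
    ∀ (suf : List Char) (k : Nat) (parts : List String) (depth : Int) (start : Nat),
      start ≤ k → cs.drop k = suf →
      splitLoopA suf parts depth ((cs.drop start).take (k - start)) =
        splitLoopB (PySem.List.enumerate suf (k : Int)) cs parts (start : Int) depth := by
  intro suf
  induction suf with
  | nil =>
    intro k parts depth start hsk hdrop
    have hlen : cs.length ≤ k := List.drop_eq_nil_iff.mp hdrop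
    have htake : (cs.drop start).take (k - start) = cs.drop start := by
      apply List.take_of_length_le
      simp [List.length_drop]; omega
    have hne : ((cs.drop start) ≠ [] ) ↔ start < cs.length := by
      rw [← List.length_pos_iff, List.length_drop]; omega
    simp only [splitLoopA, splitLoopB, PySem.List.enumerate_nil, htake,
      PySem.List.slice_from_natCast]
    by_cases h : start < cs.length
    · rw [if_pos (hne.mpr h), if_pos (by exact_mod_cast h)]
    · rw [if_neg (fun hc => h (hne.mp hc)), if_neg (by exact_mod_cast h)]
  | cons ch rest ih =>
    intro k parts depth start hsk hdrop
    have hget : cs[k]? = some ch := by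
      have h2 : (cs.drop k)[0]? = cs[k + 0]? := List.getElem?_drop
      simp [hdrop] at h2; exact h2.symm
    have hdrop' : cs.drop (k + 1) = rest := by
      have : (cs.drop k).drop 1 = cs.drop (k + 1) := by rw [List.drop_drop]
      rw [hdrop] at this; simpa using this.symm
    -- extending the buffer by one character = extending the slice by one
    have hext : (cs.drop start).take (k - start) ++ [ch] =
        (cs.drop start).take (k + 1 - start) := by
      have h1 : k + 1 - start = (k - start) + 1 := by omega
      have h2 : (cs.drop start)[k - start]? = some ch := by
        have := (List.getElem?_drop (xs := cs) (i := start) (j := k - start))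
        rw [this]; rwa [Nat.add_sub_cancel' hsk]
      rw [h1, List.take_add_one, h2]; rfl
    have hcast : (k : Int) + 1 = ((k + 1 : Nat) : Int) := by push_cast; ring
    simp only [PySem.List.enumerate_cons, splitLoopA, splitLoopB, hcast]
    by_cases h1 : ch = '('
    · simp only [if_pos h1, hext]; exact ih (k + 1) parts (depth + 1) start (by omega) hdrop'
    · by_cases h2 : ch = ')'
      · simp only [if_neg h1, if_pos h2, hext]
        exact ih (k + 1) parts (depth - 1) start (by omega) hdrop'
      · by_cases h3 : ch = ',' ∧ depth = 0
        · simp only [if_neg h1, if_neg h2, if_pos h3, PySem.List.slice_natCast]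
          have := ih (k + 1)
            (parts ++ [String.ofList (PySem.Chars.strip ((cs.drop start).take (k - start)))])
            depth (k + 1) (le_refl _) hdrop'
          simpa using this
        · simp only [if_neg h1, if_neg h2, if_neg h3, hext]
          exact ih (k + 1) parts depth start (by omega) hdrop'

-- ===== VERDICT (by name: the statement is the Claim_ definition above) =====
theorem split_select_columns_py_spec : Claim_equal_split_select_columns_py := by
  intro clause _
  unfold Spec_split_select_columns_py split_select_columns_py split_select_columns_py_alt
  have := splitLoop_agree clause.toList clause.toList 0 [] 0 0 (le_refl 0) (by simp)
  simpa using this
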